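-- pv_equiv track=rewrite | github.com/krishna-dhulipalla/CoreLink-AI | src/agent/v4/nodes.py | _targeted_fix_prompt
-- ===== SOURCE A (Python) =====
-- def _targeted_fix_prompt(missing_dimensions: list[str]) -> str:
--     normalized = [str(item).lower() for item in missing_dimensions]
--     additions: list[str] = []
--     if any("multiple structure alternatives" in item or "structure alternatives" in item for item in normalized):
--         additions.append("at least three distinct structure alternatives with tradeoffs and a clear recommendation")
--     if any("liability allocation" in item for item in normalized):
--         additions.append("explicit indemnities, escrow or holdback, caps or baskets, and survival periods")
--     if any("regulatory execution" in item for item in normalized):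
--         additions.append("regulatory approvals, pre-closing remediation covenants, and closing-condition mechanics")
--     if any("tax execution" in item for item in normalized):
--         additions.append("who gets the tax benefit, required elections or qualification conditions, and what breaks the intended tax treatment")
--     if any("employee-transfer" in item for item in normalized):
--         additions.append("employee-transfer consultation and cross-border transition mechanics")
--     if any("actionable next steps" in item or "next steps" in item for item in normalized):
--         additions.append("a concrete first-week execution plan with owners and sequencing")
--     if not additions:
--         additions.append("one concise but concrete layer of actionable detail for each missing dimension")
--     return "Add concise execution detail covering " + ", ".join(additions[:3]) + "."
-- ===== SOURCE B (Python) =====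
-- # Haystack algorithm: join all lowercased items into ONE string separated by
-- # '\x00' (no rule substring contains it, so matches cannot span items), then
-- # run each rule's single substring search against that one haystack.
-- _RULES = [
--     ("structure alternatives",
--      "at least three distinct structure alternatives with tradeoffs and a clear recommendation"),
--     ("liability allocation",
--      "explicit indemnities, escrow or holdback, caps or baskets, and survival periods"),
--     ("regulatory execution",
--      "regulatory approvals, pre-closing remediation covenants, and closing-condition mechanics"),
--     ("tax execution",
--      "who gets the tax benefit, required elections or qualification conditions, and what breaks the intended tax treatment"),
--     ("employee-transfer",
--      "employee-transfer consultation and cross-border transition mechanics"),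
--     ("next steps",
--      "a concrete first-week execution plan with owners and sequencing"),
-- ]
--
--
-- def _targeted_fix_prompt(missing_dimensions: list[str]) -> str:
--     haystack = "\x00".join(str(item).lower() for item in missing_dimensions)
--     additions = [msg for sub, msg in _RULES if sub in haystack]
--     if not additions:
--         additions = ["one concise but concrete layer of actionable detail for each missing dimension"]
--     return "Add concise execution detail covering " + ", ".join(additions[:3]) + "."
-- ===== Notes on version B (the rewrite author's own statement) =====
-- stated objective: faster
-- what changed: Instead of six any()-scans over the item list, B joins all lowercased items into one '\x00'-separated haystack string and runs each rule's substring search once against that single string (the NUL separator guarantees no match spans two items; the redundant OR-substrings are collapsed to their subsuming substring); one C-level search per rule over one string replaces a Python-level generator scan per rule.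
import Mathlib
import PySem

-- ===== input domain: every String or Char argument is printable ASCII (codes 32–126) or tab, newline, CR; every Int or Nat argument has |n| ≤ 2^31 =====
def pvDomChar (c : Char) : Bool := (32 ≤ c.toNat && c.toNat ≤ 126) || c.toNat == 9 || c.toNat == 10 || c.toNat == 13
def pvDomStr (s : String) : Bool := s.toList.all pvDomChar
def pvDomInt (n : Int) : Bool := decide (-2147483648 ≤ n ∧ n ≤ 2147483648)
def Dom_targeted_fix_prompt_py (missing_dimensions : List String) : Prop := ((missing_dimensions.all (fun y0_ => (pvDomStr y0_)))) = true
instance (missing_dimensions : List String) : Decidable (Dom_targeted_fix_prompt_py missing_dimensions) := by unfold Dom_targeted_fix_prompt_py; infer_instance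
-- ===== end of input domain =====

-- B replaces A's six per-item any()-scans by joining all lowercased items into one
-- NUL-separated haystack string and running each rule's substring search once on it
-- (objective: alternative algorithm; the '\x00' separator prevents cross-item matches).

-- ===== PORT A =====
def targeted_fix_prompt_py (missing_dimensions : List String) : String :=
  let normalized := missing_dimensions.map (fun item => PySem.Str.lower item)
  let additions : List String := []
  let additions := if normalized.any (fun item => PySem.Str.isIn "multiple structure alternatives" item || PySem.Str.isIn "structure alternatives" item) then additions ++ ["at least three distinct structure alternatives with tradeoffs and a clear recommendation"] else additions
  let additions := if normalized.any (fun item => PySem.Str.isIn "liability allocation" item) then additions ++ ["explicit indemnities, escrow or holdback, caps or baskets, and survival periods"] else additions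
  let additions := if normalized.any (fun item => PySem.Str.isIn "regulatory execution" item) then additions ++ ["regulatory approvals, pre-closing remediation covenants, and closing-condition mechanics"] else additions
  let additions := if normalized.any (fun item => PySem.Str.isIn "tax execution" item) then additions ++ ["who gets the tax benefit, required elections or qualification conditions, and what breaks the intended tax treatment"] else additions
  let additions := if normalized.any (fun item => PySem.Str.isIn "employee-transfer" item) then additions ++ ["employee-transfer consultation and cross-border transition mechanics"] else additions
  let additions := if normalized.any (fun item => PySem.Str.isIn "actionable next steps" item || PySem.Str.isIn "next steps" item) then additions ++ ["a concrete first-week execution plan with owners and sequencing"] else additions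
  let additions := if additions.isEmpty then additions ++ ["one concise but concrete layer of actionable detail for each missing dimension"] else additions
  "Add concise execution detail covering " ++ PySem.Str.join ", " (PySem.List.slice additions none (some 3)) ++ "."

-- ===== PORT B =====
-- the rule table of Source B (substring, message), in order
def pvRules : List (String × String) :=
  [("structure alternatives", "at least three distinct structure alternatives with tradeoffs and a clear recommendation"),
   ("liability allocation", "explicit indemnities, escrow or holdback, caps or baskets, and survival periods"),
   ("regulatory execution", "regulatory approvals, pre-closing remediation covenants, and closing-condition mechanics"),
   ("tax execution", "who gets the tax benefit, required elections or qualification conditions, and what breaks the intended tax treatment"),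
   ("employee-transfer", "employee-transfer consultation and cross-border transition mechanics"),
   ("next steps", "a concrete first-week execution plan with owners and sequencing")]

def targeted_fix_prompt_py_alt (missing_dimensions : List String) : String :=
  let haystack := PySem.Str.join "\x00" (missing_dimensions.map (fun item => PySem.Str.lower item))
  let additions := (pvRules.filter (fun p => PySem.Str.isIn p.1 haystack)).map (fun p => p.2)
  let additions := if additions.isEmpty then ["one concise but concrete layer of actionable detail for each missing dimension"] else additions
  "Add concise execution detail covering " ++ PySem.Str.join ", " (PySem.List.slice additions none (some 3)) ++ "."

-- ===== PRECONDITION & SPEC =====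
def Spec_targeted_fix_prompt_py (missing_dimensions : List String) (out : String) : Prop := out = targeted_fix_prompt_py_alt missing_dimensions
instance (missing_dimensions : List String) (out : String) : Decidable (Spec_targeted_fix_prompt_py missing_dimensions out) := by unfold Spec_targeted_fix_prompt_py; infer_instance

-- ===== CLAIM (what is proved, stated in full; the proofs are below) =====
def Claim_equal_targeted_fix_prompt_py : Prop := ∀ (missing_dimensions : List String), Dom_targeted_fix_prompt_py missing_dimensions → Spec_targeted_fix_prompt_py missing_dimensions (targeted_fix_prompt_py missing_dimensions)

-- ===== LEMMAS AND PROOFS =====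

-- A sep-free infix of xs ++ sep :: ys lies wholly in xs or wholly in ys.
theorem pv_split_infix {sub : List Char} {c : Char} (hc : c ∉ sub) (a rest : List Char) :
    sub <:+: (a ++ c :: rest) ↔ sub <:+: a ∨ sub <:+: rest := by
  constructor
  · rintro ⟨s, t, h⟩
    by_cases h1 : s.length + sub.length ≤ a.length
    · left
      have hp : (s ++ sub) <+: (a ++ c :: rest) := ⟨t, by simpa using h⟩
      have hp2 : (s ++ sub) <+: a :=
        List.prefix_of_prefix_length_le hp (a.prefix_append _) (by simpa using h1)
      exact (show sub <:+: s ++ sub from ⟨s, [], by simp⟩).trans hp2.isInfix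
    · by_cases h2 : a.length + 1 ≤ s.length
      · right
        have hs : s <+: (a ++ c :: rest) := ⟨sub ++ t, by simpa [List.append_assoc] using h⟩
        have hp : a <+: s := List.prefix_of_prefix_length_le (a.prefix_append _) hs (by omega)
        obtain ⟨s2, rfl⟩ := hp
        have h' : a ++ (s2 ++ (sub ++ t)) = a ++ c :: rest := by simpa [List.append_assoc] using h
        have h'' := (List.append_cancel_left h')
        match s2, h'' with
        | c2 :: s2', hh =>
          simp only [List.cons_append, List.cons.injEq] at hh
          exact ⟨s2', t, by simpa [List.append_assoc] using hh.2⟩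
        | [], hh => simp at h2
      · exfalso
        have h' : s ++ (sub ++ t) = a ++ c :: rest := by simpa [List.append_assoc] using h
        have hlen : a.length < (a ++ c :: rest).length := by simp
        have e1 : (a ++ c :: rest)[a.length]'hlen = c := by
          rw [List.getElem_append_right (le_refl _)]; simp
        have hlen2 : a.length < (s ++ (sub ++ t)).length := by rw [h']; simp
        have e2 : (s ++ (sub ++ t))[a.length]'hlen2 = c := by
          simp only [h']; exact e1
        have hge : s.length ≤ a.length := by omega
        rw [List.getElem_append_right hge] at e2
        have hlt : a.length - s.length < sub.length := by omega
        rw [List.getElem_append_left hlt] at e2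
        exact hc (e2 ▸ List.getElem_mem _)
  · rintro (h | h)
    · exact h.trans ⟨[], c :: rest, rfl⟩
    · exact h.trans ⟨a ++ [c], [], by simp⟩

-- A nonempty sep-free infix of the sep-joined list is an infix of one of the pieces.
theorem pv_infix_intercalate {sub : List Char} {c : Char} (hc : c ∉ sub) (hne : sub ≠ [])
    (l : List (List Char)) :
    sub <:+: List.intercalate [c] l ↔ ∃ x ∈ l, sub <:+: x := by
  induction l with
  | nil =>
      simp [List.intercalate]
      exact hne
  | cons a t ih =>
      match t with
      | [] => simp [List.intercalate]
      | b :: t' =>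
          have he : List.intercalate [c] (a :: b :: t') = a ++ c :: List.intercalate [c] (b :: t') := by
            simp [List.intercalate, List.intersperse]
          rw [he, pv_split_infix hc, ih]
          simp

-- the condition both programs decide for a rule substring, as a single any-scan over the items
def pvCond (md : List String) (sub : String) : Bool :=
  md.any (fun item => PySem.Str.isIn sub (PySem.Str.lower item))

-- B's one search over the NUL-joined haystack equals the per-item scan.
theorem pv_haystack_eq (md : List String) (sub : String)
    (hc : ('\x00' : Char) ∉ sub.toList) (hne : sub.toList ≠ []) :
    PySem.Str.isIn sub (PySem.Str.join "\x00" (md.map (fun item => PySem.Str.lower item)))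
      = pvCond md sub := by
  rw [Bool.eq_iff_iff]
  rw [PySem.Str.isIn_iff_infix, PySem.Str.toList_join]
  have hsep : ("\x00" : String).toList = ['\x00'] := rfl
  rw [hsep]
  unfold PySem.Chars.join
  rw [pv_infix_intercalate hc hne]
  unfold pvCond
  simp only [List.map_map, List.mem_map, List.any_eq_true, Function.comp_apply,
    PySem.Str.isIn_iff_infix]
  constructor
  · rintro ⟨x, ⟨i, hi, rfl⟩, hx⟩
    exact ⟨i, hi, hx⟩
  · rintro ⟨i, hi, hx⟩
    exact ⟨(PySem.Str.lower i).toList, ⟨i, hi, rfl⟩, hx⟩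

theorem pv_any_congr {α : Type} (l : List α) (p q : α → Bool) (h : ∀ x ∈ l, p x = q x) :
    l.any p = l.any q := by
  induction l with
  | nil => rfl
  | cons a t ih =>
      simp only [List.any_cons]
      rw [h a (by simp), ih (fun x hx => h x (by simp [hx]))]

theorem pv_isIn_mono {small big : String} (h : small.toList <:+: big.toList) (s : String)
    (hb : PySem.Str.isIn big s = true) : PySem.Str.isIn small s = true := by
  rw [PySem.Str.isIn_iff_infix] at hb ⊢
  exact h.trans hb

theorem pv_or_absorb {small big : String} (h : small.toList <:+: big.toList) (s : String) :
    (PySem.Str.isIn big s || PySem.Str.isIn small s) = PySem.Str.isIn small s := by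
  cases hb : PySem.Str.isIn big s
  · simp
  · have hs := pv_isIn_mono h s hb
    rw [hs]
    simp

-- ===== VERDICT (by name: the statement is the Claim_ definition above) =====
theorem targeted_fix_prompt_py_spec : Claim_equal_targeted_fix_prompt_py := by
  intro md _
  unfold Spec_targeted_fix_prompt_py
  simp only [targeted_fix_prompt_py, targeted_fix_prompt_py_alt, pvRules]
  rw [List.filter_cons, List.filter_cons, List.filter_cons, List.filter_cons, List.filter_cons,
      List.filter_cons, List.filter_nil]
  simp only [pv_haystack_eq md "structure alternatives" (by decide) (by decide),
             pv_haystack_eq md "liability allocation" (by decide) (by decide),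
             pv_haystack_eq md "regulatory execution" (by decide) (by decide),
             pv_haystack_eq md "tax execution" (by decide) (by decide),
             pv_haystack_eq md "employee-transfer" (by decide) (by decide),
             pv_haystack_eq md "next steps" (by decide) (by decide)]
  have ha : ∀ sub : String,
      (md.map (fun item => PySem.Str.lower item)).any (fun item => PySem.Str.isIn sub item)
        = pvCond md sub := by
    intro sub
    rw [List.any_map]
    rfl
  have ha0 : (md.map (fun item => PySem.Str.lower item)).any
      (fun item => PySem.Str.isIn "multiple structure alternatives" item || PySem.Str.isIn "structure alternatives" item)
        = pvCond md "structure alternatives" := by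
    rw [List.any_map]
    unfold pvCond
    refine pv_any_congr _ _ _ (fun x _ => ?_)
    simp only [Function.comp_apply]
    exact pv_or_absorb (by decide) _
  have ha5 : (md.map (fun item => PySem.Str.lower item)).any
      (fun item => PySem.Str.isIn "actionable next steps" item || PySem.Str.isIn "next steps" item)
        = pvCond md "next steps" := by
    rw [List.any_map]
    unfold pvCond
    refine pv_any_congr _ _ _ (fun x _ => ?_)
    simp only [Function.comp_apply]
    exact pv_or_absorb (by decide) _
  rw [ha0, ha "liability allocation", ha "regulatory execution", ha "tax execution",
      ha "employee-transfer", ha5]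
  cases pvCond md "structure alternatives" <;>
  cases pvCond md "liability allocation" <;>
  cases pvCond md "regulatory execution" <;>
  cases pvCond md "tax execution" <;>
  cases pvCond md "employee-transfer" <;>
  cases pvCond md "next steps" <;>
  rfl
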